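-- pv_equiv track=rewrite | github.com/huangweijing/weo_leetcode | 2640_Find_the_Score_of_All_Prefixes_of_an_Array.py | findPrefixScore
-- ===== SOURCE A (Python) =====
-- from typing import List
--
-- def findPrefixScore(nums: List[int]) -> List[int]:
--     ans = []
--     max_val = 0
--     for num in nums:
--         max_val = max(max_val, num)
--         conversion_val = num + max_val
--         if len(ans) > 0:
--             ans.append(ans[-1] + conversion_val)
--         else:
--             ans.append(conversion_val)
--     return ans
-- ===== SOURCE B (Python) =====
-- from typing import List
--
-- def findPrefixScore(nums: List[int]) -> List[int]:
--     # Divide and conquer: solve(seg, m) returns the scores of seg (relative sum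
--     # base 0) given incoming running max m, plus the outgoing running max.
--     def solve(seg, m):
--         if len(seg) == 0:
--             return [], m
--         if len(seg) == 1:
--             m2 = max(m, seg[0])
--             return [seg[0] + m2], m2
--         h = len(seg) // 2
--         left, ml = solve(seg[:h], m)
--         right, mr = solve(seg[h:], ml)
--         off = left[-1]
--         return left + [off + x for x in right], mr
--     ans, _ = solve(nums, 0)
--     return ans
-- ===== Notes on version B (the rewrite author's own statement) =====
-- stated objective: alternative
-- what changed: Replaces A's single left-to-right fused loop with a divide-and-conquer: each half is solved recursively with the incoming running max threaded into the right half, and the right half's relative scores are shifted by the left half's last score when merging.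
import Mathlib
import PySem

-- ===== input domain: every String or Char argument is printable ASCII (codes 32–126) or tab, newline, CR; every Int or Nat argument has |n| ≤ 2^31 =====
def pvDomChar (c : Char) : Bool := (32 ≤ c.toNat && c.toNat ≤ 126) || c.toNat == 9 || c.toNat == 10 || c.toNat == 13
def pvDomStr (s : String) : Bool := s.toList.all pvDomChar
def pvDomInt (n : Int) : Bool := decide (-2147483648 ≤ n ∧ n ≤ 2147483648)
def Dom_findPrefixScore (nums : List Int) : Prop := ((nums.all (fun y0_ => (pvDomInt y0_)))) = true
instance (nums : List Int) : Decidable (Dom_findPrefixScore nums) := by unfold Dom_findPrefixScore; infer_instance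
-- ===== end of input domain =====

-- B replaces A's single fused left-to-right loop with a divide-and-conquer solve
-- (halves solved recursively, right half shifted by the left's last score) — objective: alternative.

-- ===== PORT A =====
-- A's loop: state (ans, max_val); ans[-1] read as getLastD (branch guarantees nonempty)
def pvLoopA : List Int → List Int → Int → List Int
  | [], ans, _ => ans
  | n :: t, ans, maxVal =>
    let maxVal' := max maxVal n
    let conversionVal := n + maxVal'
    if ans.length > 0 then
      pvLoopA t (ans ++ [ans.getLastD 0 + conversionVal]) maxVal'
    else
      pvLoopA t (ans ++ [conversionVal]) maxVal'

def findPrefixScore (nums : List Int) : List Int := pvLoopA nums [] 0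

-- ===== PORT B =====
-- solve(seg, m): scores of seg relative to sum base 0 with incoming running max m, plus outgoing max
def pvSolve : List Int → Int → List Int × Int
  | [], m => ([], m)
  | [x], m => let m2 := max m x; ([x + m2], m2)
  | a :: b :: rest, m =>
    let h := (a :: b :: rest).length / 2
    let L := pvSolve ((a :: b :: rest).take h) m
    let R := pvSolve ((a :: b :: rest).drop h) L.2
    let off := L.1.getLastD 0
    (L.1 ++ R.1.map (fun x => off + x), R.2)
termination_by seg _ => seg.length
decreasing_by
  · simp [List.length_take]; omega
  · simp [List.length_drop]; omega

def findPrefixScore_alt (nums : List Int) : List Int := (pvSolve nums 0).1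

-- ===== PRECONDITION & SPEC =====
def Spec_findPrefixScore (nums : List Int) (out : List Int) : Prop := out = findPrefixScore_alt nums
instance (nums : List Int) (out : List Int) : Decidable (Spec_findPrefixScore nums out) := by unfold Spec_findPrefixScore; infer_instance

-- ===== CLAIM (what is proved, stated in full; the proofs are below) =====
def Claim_equal_findPrefixScore : Prop := ∀ (nums : List Int), Dom_findPrefixScore nums → Spec_findPrefixScore nums (findPrefixScore nums)

-- ===== LEMMAS AND PROOFS =====

-- reference shape: running max list and running sums
def pvRunMax (m : Int) : List Int → List Int
  | [] => []
  | n :: t => let m' := max m n; m' :: pvRunMax m' t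

def pvAccum (s : Int) : List Int → List Int
  | [] => []
  | c :: t => (s + c) :: pvAccum (s + c) t

theorem pvRunMax_length (m : Int) (xs : List Int) : (pvRunMax m xs).length = xs.length := by
  induction xs generalizing m with
  | nil => simp [pvRunMax]
  | cons n t ih => simp [pvRunMax, ih]

theorem pvRunMax_append (m : Int) (l r : List Int) :
    pvRunMax m (l ++ r) = pvRunMax m l ++ pvRunMax (l.foldl max m) r := by
  induction l generalizing m with
  | nil => simp [pvRunMax]
  | cons n t ih => simp [pvRunMax, ih, List.foldl]

theorem pvAccum_shift (s : Int) (xs : List Int) :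
    pvAccum s xs = (pvAccum 0 xs).map (fun x => s + x) := by
  induction xs generalizing s with
  | nil => simp [pvAccum]
  | cons c t ih =>
    simp only [pvAccum, List.map, zero_add]
    congr 1
    rw [ih (s + c), ih c]
    simp [List.map_map, add_assoc]

theorem pvAccum_append (s : Int) (c d : List Int) :
    pvAccum s (c ++ d) = pvAccum s c ++ pvAccum ((pvAccum s c).getLastD s) d := by
  induction c generalizing s with
  | nil => simp [pvAccum]
  | cons x t ih =>
    simp only [List.cons_append, pvAccum, ih (s + x), List.getLastD_cons]

-- spec of B's solve
def pvSpecList (m : Int) (seg : List Int) : List Int :=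
  pvAccum 0 (List.zipWith (· + ·) seg (pvRunMax m seg))

theorem pvSpecList_append (m : Int) (l r : List Int) :
    pvSpecList m (l ++ r) =
      pvSpecList m l ++ (pvSpecList (l.foldl max m) r).map
        (fun x => (pvSpecList m l).getLastD 0 + x) := by
  unfold pvSpecList
  rw [pvRunMax_append, List.zipWith_append (by rw [pvRunMax_length]),
      pvAccum_append, ← pvAccum_shift]

theorem pvSolve_eq (seg : List Int) (m : Int) :
    pvSolve seg m = (pvSpecList m seg, seg.foldl max m) := by
  induction seg, m using pvSolve.induct with
  | case1 m => simp [pvSolve, pvSpecList, pvRunMax, pvAccum]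
  | case2 x m => simp [pvSolve, pvSpecList, pvRunMax, pvAccum, List.foldl]
  | case3 a b rest m hlet Llet ihT ihT' ihD =>
    clear ihT
    have hh : hlet = (a :: b :: rest).length / 2 := rfl
    have hL : Llet = pvSolve (List.take hlet (a :: b :: rest)) m := rfl
    simp only [hh, hL, ihT'] at ihD
    rw [pvSolve, ihT']
    simp only [ihD]
    have hsplit : ((a :: b :: rest).take ((a :: b :: rest).length / 2)) ++
        ((a :: b :: rest).drop ((a :: b :: rest).length / 2)) = a :: b :: rest :=
      List.take_append_drop _ _
    refine Prod.ext ?_ ?_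
    · show pvSpecList m _ ++ _ = pvSpecList m (a :: b :: rest)
      conv_rhs => rw [← hsplit]
      rw [pvSpecList_append]
    · show List.foldl max _ _ = List.foldl max m (a :: b :: rest)
      conv_rhs => rw [← hsplit]
      rw [List.foldl_append]

-- A's loop equals the reference shape
theorem pvLoopA_eq (nums : List Int) : ∀ (ans : List Int) (m : Int),
    pvLoopA nums ans m = ans ++ pvAccum (ans.getLastD 0) (List.zipWith (· + ·) nums (pvRunMax m nums)) := by
  induction nums with
  | nil => intro ans m; simp [pvLoopA, pvRunMax, pvAccum]
  | cons n t ih =>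
    intro ans m
    simp only [pvLoopA, pvRunMax, List.zipWith, pvAccum]
    by_cases h : ans.length > 0
    · simp only [if_pos h, ih]
      have hne : ans ≠ [] := by rintro rfl; simp at h
      rw [List.getLastD_concat]
      simp
    · have hnil : ans = [] := List.length_eq_zero_iff.mp (by omega)
      subst hnil
      simp only [if_neg h, ih]
      simp

-- ===== VERDICT (by name: the statement is the Claim_ definition above) =====
theorem findPrefixScore_spec : Claim_equal_findPrefixScore := by
  intro nums _
  unfold Spec_findPrefixScore findPrefixScore findPrefixScore_alt
  rw [pvSolve_eq]
  simpa [pvSpecList] using pvLoopA_eq nums [] 0
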